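-- pv_equiv track=rewrite | github.com/eligoldweber/verus-finite | finite_examples/scalableTests/indexUpTo/scaleTestIndexUpTo.py | transform_function
-- ===== SOURCE A (Python) =====
-- def transform_function(lines, int_param):
--     new_lines = []
--     function_started = False
--
--     for line in lines:
--         # Identify the start of the function to replace
--         if "fn indexUpTo(n:u32)" in line:
--             new_lines.append(f"fn indexUpTo_finite_{int_param}() -> (f: Vec<u32>)\n")
--             new_lines.append(f"    ensures f.len() == {int_param}, \n")
--             new_lines.append(f"             f[0] == 0,\n")
--             new_lines.append(f"             f[{int_param}-1] != 0,\n")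
--             new_lines.append("{\n")
--             new_lines.append("    let mut v: Vec<u32> = Vec::new();\n")
--             new_lines.append("    v.push(0);\n")
--             new_lines.append("    let mut i:u32 = 1;\n")
--
--             # Generate `if` statements based on int_param
--             for i in range(int_param):
--                 new_lines.append(f"    if(i < {int_param}) {{\n")
--                 new_lines.append(f"        v.push(i);\n")
--                 new_lines.append(f"        i = i + 1;\n")
--                 new_lines.append("    }\n")
--
--             new_lines.append("    return v;\n")
--             new_lines.append("}\n\n")
--             function_started = True
--             continue
--
--         # If the function has started, skip old lines
--         if function_started:
--             continue
--
--         # Keep any other lines outside the function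
--         new_lines.append(line)
--
--     # Ensure the main function is retained and close the verus! brace
--     new_lines.append("fn main()\n{\n}\n")
--     new_lines.append("}\n")  # Closing brace for verus!
--
--     return new_lines
-- ===== SOURCE B (Python) =====
-- def transform_function(lines, int_param):
--     marker = "fn indexUpTo(n:u32)"
--     idx = next((i for i, l in enumerate(lines) if marker in l), None)
--     if idx is None:
--         out = list(lines)
--     else:
--         out = lines[:idx]
--         out.append(f"fn indexUpTo_finite_{int_param}() -> (f: Vec<u32>)\n")
--         out.append(f"    ensures f.len() == {int_param}, \n")
--         out.append("             f[0] == 0,\n")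
--         out.append(f"             f[{int_param}-1] != 0,\n")
--         out.append("{\n")
--         out.append("    let mut v: Vec<u32> = Vec::new();\n")
--         out.append("    v.push(0);\n")
--         out.append("    let mut i:u32 = 1;\n")
--         out.extend(
--             s
--             for _ in range(int_param)
--             for s in (
--                 f"    if(i < {int_param}) {{\n",
--                 "        v.push(i);\n",
--                 "        i = i + 1;\n",
--                 "    }\n",
--             )
--         )
--         out.append("    return v;\n")
--         out.append("}\n\n")
--     out.append("fn main()\n{\n}\n")
--     out.append("}\n")
--     return out
-- ===== Notes on version B (the rewrite author's own statement) =====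
-- stated objective: alternative
-- what changed: Replaces A's single stateful scan with a function_started flag by locate-then-slice-then-assemble: find the first marker line, keep the prefix before it, append one generated replacement block (if-blocks built by a comprehension) and the fixed tail; Pre_ excludes malformed sources with two or more marker lines (duplicate definitions of the replaced function), an unspecified corner where A re-emits the block once per marker and B substitutes it once.
import Mathlib
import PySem

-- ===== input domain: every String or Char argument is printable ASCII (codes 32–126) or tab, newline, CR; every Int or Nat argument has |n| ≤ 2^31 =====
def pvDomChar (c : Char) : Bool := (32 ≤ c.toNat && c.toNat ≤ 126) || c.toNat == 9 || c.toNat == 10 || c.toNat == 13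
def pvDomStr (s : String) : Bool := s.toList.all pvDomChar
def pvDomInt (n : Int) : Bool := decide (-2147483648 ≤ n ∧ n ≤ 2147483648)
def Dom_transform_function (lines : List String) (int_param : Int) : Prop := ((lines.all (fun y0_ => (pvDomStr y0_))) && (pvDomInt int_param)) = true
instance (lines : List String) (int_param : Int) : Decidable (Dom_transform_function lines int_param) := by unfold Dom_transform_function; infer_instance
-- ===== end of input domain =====

-- B replaces A's stateful flag-scan by locate-then-slice-then-assemble; proved equal on Pre_
-- (at most one marker line; on duplicate-marker input A re-emits the block per marker, B once).

-- shared string literals (the generated Verus lines, identical text in both Pythons)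
def pvMarker : String := "fn indexUpTo(n:u32)"

def pvHdr (n : Int) : List String :=
  ["fn indexUpTo_finite_" ++ PySem.Int.toStr n ++ "() -> (f: Vec<u32>)\n",
   "    ensures f.len() == " ++ PySem.Int.toStr n ++ ", \n",
   "             f[0] == 0,\n",
   "             f[" ++ PySem.Int.toStr n ++ "-1] != 0,\n",
   "{\n",
   "    let mut v: Vec<u32> = Vec::new();\n",
   "    v.push(0);\n",
   "    let mut i:u32 = 1;\n"]

def pvIf (n : Int) : List String :=
  ["    if(i < " ++ PySem.Int.toStr n ++ ") {\n",
   "        v.push(i);\n",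
   "        i = i + 1;\n",
   "    }\n"]

def pvTail : List String := ["    return v;\n", "}\n\n"]

-- ===== PORT A =====
def transform_function (lines : List String) (int_param : Int) : List String :=
  (lines.foldl
    (fun (st : List String × Bool) line =>
      if PySem.Str.isIn pvMarker line then
        (((PySem.List.pyRange 0 int_param 1).foldl
            (fun nl _i => nl ++ pvIf int_param) (st.1 ++ pvHdr int_param)) ++ pvTail, true)
      else if st.2 then st
      else (st.1 ++ [line], st.2))
    ([], false)).1 ++ ["fn main()\n{\n}\n", "}\n"]

-- ===== PORT B =====
def transform_function_alt (lines : List String) (int_param : Int) : List String :=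
  (match lines.findIdx? (fun l => PySem.Str.isIn pvMarker l) with
   | none => lines
   | some i =>
       lines.take i ++ pvHdr int_param
         ++ (PySem.List.pyRange 0 int_param 1).flatMap (fun _i => pvIf int_param)
         ++ pvTail)
  ++ ["fn main()\n{\n}\n", "}\n"]

-- ===== PRECONDITION & SPEC =====
-- Pre_ excludes inputs in which two or more lines contain the marker (a malformed source with
-- duplicate definitions of the function being replaced): A re-emits the replacement block once per
-- marker line, B substitutes it once — an unspecified corner where neither value is the intended one.
def Pre_transform_function (lines : List String) (int_param : Int) : Prop :=
  (lines.filter (fun l => decide ("fn indexUpTo(n:u32)".toList <:+: l.toList))).length ≤ 1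
instance (lines : List String) (int_param : Int) : Decidable (Pre_transform_function lines int_param) := by unfold Pre_transform_function; infer_instance

def pvWitness_transform_function : List String × Int :=
  (["verus! {", "fn indexUpTo(n:u32)", "old body"], 2)

def Spec_transform_function (lines : List String) (int_param : Int) (out : List String) : Prop := out = transform_function_alt lines int_param
instance (lines : List String) (int_param : Int) (out : List String) : Decidable (Spec_transform_function lines int_param out) := by unfold Spec_transform_function; infer_instance

-- ===== CLAIM (what is proved, stated in full; the proofs are below) =====
def Claim_equal_transform_function : Prop := ∀ (lines : List String) (int_param : Int), Dom_transform_function lines int_param → Pre_transform_function lines int_param → Spec_transform_function lines int_param (transform_function lines int_param)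

-- ===== LEMMAS AND PROOFS =====

theorem pv_countP_eq_filter_len (lines : List String) :
    lines.countP (fun l => PySem.Str.isIn pvMarker l)
      = (lines.filter (fun l => decide ("fn indexUpTo(n:u32)".toList <:+: l.toList))).length := by
  rw [← List.countP_eq_length_filter]
  apply List.countP_congr
  intro x _
  constructor <;> intro h
  · simpa using (PySem.Str.isIn_iff_infix _ _).mp h
  · exact (PySem.Str.isIn_iff_infix _ _).mpr (by simpa using h)

-- the block A emits for one marker line (proof-side)
def pvBlk (n : Int) : List String :=
  pvHdr n ++ ((PySem.List.pyRange 0 n 1).flatMap (fun _i => pvIf n) ++ pvTail)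

def pvStep (n : Int) (st : List String × Bool) (line : String) : List String × Bool :=
  if PySem.Str.isIn pvMarker line then (st.1 ++ pvBlk n, true)
  else if st.2 then st else (st.1 ++ [line], st.2)

theorem pv_step_eq (n : Int) :
    (fun (st : List String × Bool) line =>
      if PySem.Str.isIn pvMarker line then
        (((PySem.List.pyRange 0 n 1).foldl
            (fun nl _i => nl ++ pvIf n) (st.1 ++ pvHdr n)) ++ pvTail, true)
      else if st.2 then st
      else (st.1 ++ [line], st.2)) = pvStep n := by
  funext st line
  unfold pvStep pvBlk
  split_ifs with h h2
  · rw [PySem.List.foldl_append_eq_flatMap]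
    simp
  · rfl
  · rfl

theorem pv_foldl_true (n : Int) (ls : List String) (acc : List String) :
    (ls.foldl (pvStep n) (acc, true)).1
      = acc ++ (List.replicate (ls.countP (fun l => PySem.Str.isIn pvMarker l)) (pvBlk n)).flatten := by
  induction ls generalizing acc with
  | nil => simp
  | cons hd tl ih =>
    by_cases h : PySem.Chars.isIn pvMarker.toList hd.toList = true
    · simp [pvStep, h, ih, List.replicate_succ]
    · simp [pvStep, h, ih]

theorem pv_foldl_false (n : Int) (ls : List String) (acc : List String) :
    (ls.foldl (pvStep n) (acc, false)).1
      = acc ++ (if ls.countP (fun l => PySem.Str.isIn pvMarker l) = 0 then ls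
          else ls.takeWhile (fun l => !PySem.Str.isIn pvMarker l) ++
            (List.replicate (ls.countP (fun l => PySem.Str.isIn pvMarker l)) (pvBlk n)).flatten) := by
  induction ls generalizing acc with
  | nil => simp
  | cons hd tl ih =>
    by_cases h : PySem.Chars.isIn pvMarker.toList hd.toList = true
    · have ht := pv_foldl_true n tl (acc ++ pvBlk n)
      simp [pvStep, h, ht, List.replicate_succ]
    · rw [List.foldl_cons]
      have hstep : pvStep n (acc, false) hd = (acc ++ [hd], false) := by
        simp [pvStep, h]
      rw [hstep, ih]
      simp [h]
      split_ifs <;> rfl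

-- B's matched branch in takeWhile/count form
theorem pv_alt_char (p : String → Bool) (ls : List String) (blk : List String) :
    (match ls.findIdx? p with
     | none => ls
     | some i => ls.take i ++ blk)
    = (if ls.countP p = 0 then ls
       else ls.takeWhile (fun l => !p l) ++ blk) := by
  induction ls with
  | nil => simp
  | cons hd tl ih =>
    by_cases h : p hd = true
    · simp [List.findIdx?_cons, h, List.countP_cons]
    · rw [List.findIdx?_cons]
      simp only [h, cond_false, List.countP_cons, if_neg, List.takeWhile_cons]
      cases hf : tl.findIdx? p with
      | none =>
        have hc : tl.countP p = 0 := by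
          apply List.countP_eq_zero.mpr
          intro x hx
          simpa using List.findIdx?_eq_none_iff.mp hf x hx
        simp [hc, h]
      | some i =>
        rw [hf] at ih
        have hc : tl.countP p ≠ 0 := by
          intro h0
          have hnone : tl.findIdx? p = none := by
            apply List.findIdx?_eq_none_iff.mpr
            intro x hx
            simpa using List.countP_eq_zero.mp h0 x hx
          simp [hnone] at hf
        simp only [Option.map_some, List.take_succ_cons, if_neg hc] at ih ⊢
        simp [h, hc, ih]

-- ===== VERDICT (by name: the statement is the Claim_ definition above) =====
theorem transform_function_spec : Claim_equal_transform_function := by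
  intro lines n _ hP0
  unfold Pre_transform_function at hP0
  have hD : ¬ 2 ≤ lines.countP (fun l => PySem.Str.isIn pvMarker l) := by
    rw [pv_countP_eq_filter_len]; omega
  show transform_function lines n = transform_function_alt lines n
  unfold transform_function transform_function_alt
  rw [pv_step_eq n, pv_foldl_false n lines []]
  have halt : (match lines.findIdx? (fun l => PySem.Str.isIn pvMarker l) with
      | none => lines
      | some i => lines.take i ++ pvHdr n
          ++ (PySem.List.pyRange 0 n 1).flatMap (fun _i => pvIf n) ++ pvTail)
      = (match lines.findIdx? (fun l => PySem.Str.isIn pvMarker l) with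
      | none => lines
      | some i => lines.take i ++ (pvHdr n
          ++ ((PySem.List.pyRange 0 n 1).flatMap (fun _i => pvIf n) ++ pvTail))) := by
    cases lines.findIdx? (fun l => PySem.Str.isIn pvMarker l) <;> simp
  rw [halt, pv_alt_char]
  have hc : lines.countP (fun l => PySem.Str.isIn pvMarker l) = 0 ∨
      lines.countP (fun l => PySem.Str.isIn pvMarker l) = 1 := by omega
  rcases hc with hc | hc
  · rw [if_pos hc, if_pos hc]; simp
  · rw [if_neg (by omega), if_neg (by omega), hc]
    simp [pvBlk]
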